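-- pv_equiv track=rewrite | github.com/ctrlaltdean/cirrus | cirrus/analysis/report.py | _flag_severity
-- ===== SOURCE A (Python) =====
-- def _flag_severity(flags: list[str]) -> str:
--     high_prefixes = (
--         "HIGH_PERSISTENCE_METHOD", "SUSPICIOUS_AUTH_PROTOCOL", "IMPOSSIBLE_TRAVEL",
--         "EXTERNAL_EMAIL_OTP", "USABLE_TEMP_ACCESS_PASS", "EXTERNAL_SMTP_FORWARD",
--         "HIGH_PRIV_ROLE_ASSIGNED", "RISK_STATE:confirmedCompromised", "RISK_STATE:atRisk",
--         "RISK_LEVEL:high", "GEO_RISK:", "IDENTITY_RISK:", "HAS_APP_PERMISSIONS",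
--         "ADMIN_PASSWORD_RESET", "APP_CONSENT_GRANTED", "CA_POLICY_DELETED",
--     )
--     medium_prefixes = (
--         "RECENTLY_ADDED", "RECENTLY_CREATED", "RECENTLY_REGISTERED", "MULTIPLE_AUTHENTICATOR",
--         "NO_LOCAL_COPY", "FORWARDS_TO:", "PERMANENT_DELETE", "HIGH_RISK_SCOPE:",
--         "RECENTLY_CREATED", "RISK_LEVEL:medium", "ROLE_ASSIGNMENT:", "MULTIPLE_PHONE",
--         "HAS_CLIENT_SECRETS", "MULTI_TENANT", "GUEST_ACCOUNT", "PUBLIC_IP:",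
--     )
--     for f in flags:
--         if any(f.startswith(p) for p in high_prefixes):
--             return "high"
--     for f in flags:
--         if any(f.startswith(p) for p in medium_prefixes):
--             return "medium"
--     return "low"
-- ===== SOURCE B (Python) =====
-- HIGH_PREFIXES = (
--     "HIGH_PERSISTENCE_METHOD", "SUSPICIOUS_AUTH_PROTOCOL", "IMPOSSIBLE_TRAVEL",
--     "EXTERNAL_EMAIL_OTP", "USABLE_TEMP_ACCESS_PASS", "EXTERNAL_SMTP_FORWARD",
--     "HIGH_PRIV_ROLE_ASSIGNED", "RISK_STATE:confirmedCompromised", "RISK_STATE:atRisk",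
--     "RISK_LEVEL:high", "GEO_RISK:", "IDENTITY_RISK:", "HAS_APP_PERMISSIONS",
--     "ADMIN_PASSWORD_RESET", "APP_CONSENT_GRANTED", "CA_POLICY_DELETED",
-- )
-- MEDIUM_PREFIXES = (
--     "RECENTLY_ADDED", "RECENTLY_CREATED", "RECENTLY_REGISTERED", "MULTIPLE_AUTHENTICATOR",
--     "NO_LOCAL_COPY", "FORWARDS_TO:", "PERMANENT_DELETE", "HIGH_RISK_SCOPE:",
--     "RECENTLY_CREATED", "RISK_LEVEL:medium", "ROLE_ASSIGNMENT:", "MULTIPLE_PHONE",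
--     "HAS_CLIENT_SECRETS", "MULTI_TENANT", "GUEST_ACCOUNT", "PUBLIC_IP:",
-- )
--
-- def _rank(f: str) -> int:
--     if f.startswith(HIGH_PREFIXES):
--         return 2
--     if f.startswith(MEDIUM_PREFIXES):
--         return 1
--     return 0
--
-- def _flag_severity(flags: list[str]) -> str:
--     worst = 0
--     for f in flags:
--         worst = max(worst, _rank(f))
--     return ("low", "medium", "high")[worst]
-- ===== Notes on version B (the rewrite author's own statement) =====
-- stated objective: simpler
-- what changed: Replaces A's two sequential full-list scans (high first, then medium) by a single accumulating pass that ranks each flag 2/1/0 (high before medium per flag) and keeps the running max, then maps the max rank to a severity word; prefix tests use str.startswith with a tuple instead of a per-flag any() generator.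
import Mathlib
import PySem

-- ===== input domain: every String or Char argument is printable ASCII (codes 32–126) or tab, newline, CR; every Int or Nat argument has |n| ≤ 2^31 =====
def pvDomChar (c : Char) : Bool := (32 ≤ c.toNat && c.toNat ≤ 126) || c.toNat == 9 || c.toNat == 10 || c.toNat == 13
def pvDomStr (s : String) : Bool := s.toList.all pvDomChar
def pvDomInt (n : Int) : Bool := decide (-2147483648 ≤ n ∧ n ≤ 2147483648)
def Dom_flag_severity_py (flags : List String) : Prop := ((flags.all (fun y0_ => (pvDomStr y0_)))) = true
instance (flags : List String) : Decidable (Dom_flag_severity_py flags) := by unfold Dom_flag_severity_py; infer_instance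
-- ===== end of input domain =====

-- B replaces A's two sequential full-list scans by a single accumulating pass
-- (per-flag rank 2/1/0, high before medium, running max), for simplicity.


def pvHighPrefixes : List String :=
  ["HIGH_PERSISTENCE_METHOD", "SUSPICIOUS_AUTH_PROTOCOL", "IMPOSSIBLE_TRAVEL",
   "EXTERNAL_EMAIL_OTP", "USABLE_TEMP_ACCESS_PASS", "EXTERNAL_SMTP_FORWARD",
   "HIGH_PRIV_ROLE_ASSIGNED", "RISK_STATE:confirmedCompromised", "RISK_STATE:atRisk",
   "RISK_LEVEL:high", "GEO_RISK:", "IDENTITY_RISK:", "HAS_APP_PERMISSIONS",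
   "ADMIN_PASSWORD_RESET", "APP_CONSENT_GRANTED", "CA_POLICY_DELETED"]

def pvMediumPrefixes : List String :=
  ["RECENTLY_ADDED", "RECENTLY_CREATED", "RECENTLY_REGISTERED", "MULTIPLE_AUTHENTICATOR",
   "NO_LOCAL_COPY", "FORWARDS_TO:", "PERMANENT_DELETE", "HIGH_RISK_SCOPE:",
   "RECENTLY_CREATED", "RISK_LEVEL:medium", "ROLE_ASSIGNMENT:", "MULTIPLE_PHONE",
   "HAS_CLIENT_SECRETS", "MULTI_TENANT", "GUEST_ACCOUNT", "PUBLIC_IP:"]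

-- ===== PORT A =====
-- first loop: return "high" on the first flag matching a high prefix
def pvAScanHigh (flags : List String) : Option String :=
  match flags with
  | [] => none
  | f :: rest =>
    if pvHighPrefixes.any (fun p => PySem.Str.startswith f p) then some "high"
    else pvAScanHigh rest

-- second loop: return "medium" on the first flag matching a medium prefix
def pvAScanMedium (flags : List String) : Option String :=
  match flags with
  | [] => none
  | f :: rest =>
    if pvMediumPrefixes.any (fun p => PySem.Str.startswith f p) then some "medium"
    else pvAScanMedium rest

def flag_severity_py (flags : List String) : String :=
  match pvAScanHigh flags with
  | some r => r
  | none =>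
    match pvAScanMedium flags with
    | some r => r
    | none => "low"

-- ===== PORT B =====
def pvRank (f : String) : Nat :=
  if pvHighPrefixes.any (fun p => PySem.Str.startswith f p) then 2
  else if pvMediumPrefixes.any (fun p => PySem.Str.startswith f p) then 1
  else 0

def flag_severity_py_alt (flags : List String) : String :=
  let worst := flags.foldl (fun m f => max m (pvRank f)) 0
  -- ("low", "medium", "high")[worst]
  if worst = 0 then "low" else if worst = 1 then "medium" else "high"

-- ===== PRECONDITION & SPEC =====
def Spec_flag_severity_py (flags : List String) (out : String) : Prop := out = flag_severity_py_alt flags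
instance (flags : List String) (out : String) : Decidable (Spec_flag_severity_py flags out) := by unfold Spec_flag_severity_py; infer_instance

-- ===== CLAIM (what is proved, stated in full; the proofs are below) =====
def Claim_equal_flag_severity_py : Prop := ∀ (flags : List String), Dom_flag_severity_py flags → Spec_flag_severity_py flags (flag_severity_py flags)

-- ===== LEMMAS AND PROOFS =====

lemma pvAScanHigh_eq (flags : List String) :
    pvAScanHigh flags =
      (if flags.any (fun f => pvHighPrefixes.any (fun p => PySem.Str.startswith f p))
       then some "high" else none) := by
  induction flags with
  | nil => simp [pvAScanHigh]
  | cons f rest ih =>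
    simp only [pvAScanHigh, List.any_cons, ih]
    split_ifs <;> simp_all <;> aesop

lemma pvAScanMedium_eq (flags : List String) :
    pvAScanMedium flags =
      (if flags.any (fun f => pvMediumPrefixes.any (fun p => PySem.Str.startswith f p))
       then some "medium" else none) := by
  induction flags with
  | nil => simp [pvAScanMedium]
  | cons f rest ih =>
    simp only [pvAScanMedium, List.any_cons, ih]
    split_ifs <;> simp_all <;> aesop

def pvWorst (flags : List String) : Nat :=
  if flags.any (fun f => pvHighPrefixes.any (fun p => PySem.Str.startswith f p)) then 2
  else if flags.any (fun f => pvMediumPrefixes.any (fun p => PySem.Str.startswith f p)) then 1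
  else 0

lemma pvWorst_cons (f : String) (rest : List String) :
    pvWorst (f :: rest) = max (pvRank f) (pvWorst rest) := by
  unfold pvWorst pvRank
  simp only [List.any_cons]
  split_ifs <;> simp_all <;> aesop

lemma pvFold_eq (flags : List String) (a : Nat) :
    flags.foldl (fun m f => max m (pvRank f)) a = max a (pvWorst flags) := by
  induction flags generalizing a with
  | nil => simp [pvWorst]
  | cons f rest ih =>
    rw [List.foldl_cons, ih, pvWorst_cons]
    omega

-- ===== VERDICT (by name: the statement is the Claim_ definition above) =====
theorem flag_severity_py_spec : Claim_equal_flag_severity_py := by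
  intro flags _
  unfold Spec_flag_severity_py flag_severity_py flag_severity_py_alt
  rw [pvAScanHigh_eq, pvAScanMedium_eq, pvFold_eq]
  unfold pvWorst
  split_ifs <;> simp_all
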